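-- pv_equiv track=rewrite | github.com/barseghyanartur/itnpy | src/itnpy/itn.py | group_tokens
-- ===== SOURCE A (Python) =====
-- from typing import List, Union
--
-- def group_tokens(tokens: List[str], mask: List[int]) -> List[dict]:
--     groups = []
--     start = 0
--
--     for i, _ in enumerate(tokens):
--         if i:
--             if value != mask[i]:
--                 groups.append({value: tokens[start:i]})
--                 start = i
--
--         value = mask[i]
--
--     if tokens:
--         groups.append({value: tokens[start : i + 1]})
--
--     return groups
-- ===== SOURCE B (Python) =====
-- from itertools import groupby
--
--
-- def group_tokens(tokens, mask):
--     return [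
--         {value: [tok for _, tok in run]}
--         for value, run in groupby(zip(mask, tokens), key=lambda p: p[0])
--     ]
-- ===== Notes on version B (the rewrite author's own statement) =====
-- stated objective: idiomatic
-- what changed: Replaces the manual index loop with its start/previous-value state, boundary detection and slicing by itertools.groupby over zip(mask, tokens), materializing each run directly.
import Mathlib
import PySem

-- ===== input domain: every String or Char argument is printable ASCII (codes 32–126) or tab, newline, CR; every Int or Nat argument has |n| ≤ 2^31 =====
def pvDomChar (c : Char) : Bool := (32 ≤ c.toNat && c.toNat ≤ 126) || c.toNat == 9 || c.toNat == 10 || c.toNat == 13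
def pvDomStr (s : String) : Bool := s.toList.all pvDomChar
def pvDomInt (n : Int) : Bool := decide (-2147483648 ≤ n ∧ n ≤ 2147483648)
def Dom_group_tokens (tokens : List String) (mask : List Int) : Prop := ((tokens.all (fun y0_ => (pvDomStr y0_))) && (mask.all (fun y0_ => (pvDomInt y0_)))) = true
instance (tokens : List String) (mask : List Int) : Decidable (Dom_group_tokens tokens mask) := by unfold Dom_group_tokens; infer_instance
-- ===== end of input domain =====

-- Port A = original index loop with start/previous-value state; port B = run splitting
-- (itertools.groupby over zip(mask, tokens)); B is the more idiomatic decomposition.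


-- ===== PORT A =====
-- mask[i]: Python raises IndexError out of range; pyGet? is none exactly there
-- (excluded by Pre_group_tokens), so the .getD 0 default is never read inside Pre_.
def pvMget (mask : List Int) (i : Nat) : Int :=
  (PySem.List.pyGet? mask (i : Int)).getD 0

def pvBody (tokens : List String) (mask : List Int)
    (s : List (List (Int × List String)) × Nat × Int) (i : Nat) :
    List (List (Int × List String)) × Nat × Int :=
  let groups := s.1
  let start := s.2.1
  let value := s.2.2
  if i ≠ 0 ∧ value ≠ pvMget mask i then
    (groups ++ [[(value, PySem.List.slice tokens (some (start : Int)) (some (i : Int)))]],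
      i, pvMget mask i)
  else
    (groups, start, pvMget mask i)

def group_tokens (tokens : List String) (mask : List Int) : List (List (Int × List String)) :=
  let n := tokens.length
  let st := (List.range n).foldl (pvBody tokens mask) ([], 0, 0)
  if tokens.isEmpty then st.1
  else
    -- after the loop i = n - 1, so tokens[start : i + 1] = tokens[start : n]
    st.1 ++ [[(st.2.2, PySem.List.slice tokens (some (st.2.1 : Int)) (some (n : Int)))]]

-- ===== PORT B =====
-- itertools.groupby: peel one maximal run of equal keys at a time.
def pvRuns : List (Int × String) → List (List (Int × List String))
  | [] => []
  | (v, t) :: rest =>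
      [(v, t :: (rest.takeWhile (fun p => p.1 == v)).map Prod.snd)] ::
        pvRuns (rest.dropWhile (fun p => p.1 == v))
termination_by l => l.length
decreasing_by
  simp only [List.length_cons]
  exact Nat.lt_succ_of_le (List.length_dropWhile_le _ _)

def group_tokens_alt (tokens : List String) (mask : List Int) : List (List (Int × List String)) :=
  pvRuns (mask.zip tokens)

-- ===== PRECONDITION & SPEC =====
-- Pre_ excludes exactly the inputs where A raises IndexError: a mask shorter than tokens.
def Pre_group_tokens (tokens : List String) (mask : List Int) : Prop :=
  tokens.length ≤ mask.length
instance (tokens : List String) (mask : List Int) : Decidable (Pre_group_tokens tokens mask) := by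
  unfold Pre_group_tokens; infer_instance

def pvWitness_group_tokens : List String × List Int :=
  (["a", "b", "c"], [1, 1, 2])

def Spec_group_tokens (tokens : List String) (mask : List Int) (out : List (List (Int × List String))) : Prop := out = group_tokens_alt tokens mask
instance (tokens : List String) (mask : List Int) (out : List (List (Int × List String))) : Decidable (Spec_group_tokens tokens mask out) := by unfold Spec_group_tokens; infer_instance

-- ===== CLAIM (what is proved, stated in full; the proofs are below) =====
def Claim_equal_group_tokens : Prop := ∀ (tokens : List String) (mask : List Int), Dom_group_tokens tokens mask → Pre_group_tokens tokens mask → Spec_group_tokens tokens mask (group_tokens tokens mask)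


-- ===== LEMMAS AND PROOFS =====

-- groupby spec helper: current key v, tokens of the open run acc, remaining pairs.
def pvGo (v : Int) (acc : List String) : List (Int × String) → List (List (Int × List String))
  | [] => [[(v, acc)]]
  | (m, t) :: rest =>
      if m = v then pvGo v (acc ++ [t]) rest
      else [(v, acc)] :: pvGo m [t] rest

lemma pvGo_eq_runs (l : List (Int × String)) : ∀ (v : Int) (acc : List String),
    pvGo v acc l =
      [(v, acc ++ (l.takeWhile (fun p => p.1 == v)).map Prod.snd)] ::
        pvRuns (l.dropWhile (fun p => p.1 == v)) := by
  induction l with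
  | nil => intro v acc; simp [pvGo, pvRuns]
  | cons p rest ih =>
      intro v acc
      obtain ⟨m, t⟩ := p
      by_cases h : m = v
      · simp [pvGo, h, ih]
      · simp [pvGo, h, pvRuns, ih]

lemma pvRuns_cons (v : Int) (t : String) (rest : List (Int × String)) :
    pvRuns ((v, t) :: rest) = pvGo v [t] rest := by
  rw [pvGo_eq_runs]
  simp [pvRuns]

lemma pvMget_eq (mask : List Int) (i : Nat) (h : i < mask.length) :
    pvMget mask i = mask[i] := by
  simp [pvMget, pysem, h]

lemma pvTakeOneDrop (tokens : List String) (b : Nat) (h : b < tokens.length) :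
    (tokens.drop b).take 1 = [tokens[b]] := by
  rw [List.drop_eq_getElem_cons h]; rfl

lemma pvTakeSuccDrop (tokens : List String) (s b : Nat) (hs : s ≤ b) (h : b < tokens.length) :
    (tokens.drop s).take (b + 1 - s) = (tokens.drop s).take (b - s) ++ [tokens[b]] := by
  have h1 : b + 1 - s = (b - s) + 1 := by omega
  rw [h1, List.take_add_one]
  have h2 : (tokens.drop s)[b - s]? = some tokens[b] := by
    rw [List.getElem?_drop, List.getElem?_eq_getElem (by omega)]
    congr 1; congr 1; omega
  simp [h2]

lemma pvZipDrop (mask : List Int) (tokens : List String) (i : Nat)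
    (h : i < tokens.length) (hp : tokens.length ≤ mask.length) :
    (mask.zip tokens).drop i =
      (mask[i]'(by omega), tokens[i]) :: (mask.zip tokens).drop (i + 1) := by
  rw [List.drop_eq_getElem_cons (by simp [List.length_zip]; omega)]
  congr 1
  exact List.getElem_zip

lemma pvZipDropEnd (mask : List Int) (tokens : List String) :
    (mask.zip tokens).drop tokens.length = [] := by
  apply List.drop_eq_nil_of_le
  simp [List.length_zip]

-- main loop invariant, by induction on the remaining fuel d
lemma pvLoopA (tokens : List String) (mask : List Int)
    (hpre : tokens.length ≤ mask.length) :
    ∀ (d j : Nat) (groups : List (List (Int × List String))) (start : Nat),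
      j + 1 + d = tokens.length → start ≤ j →
      (let s := (List.range' (j + 1) d).foldl (pvBody tokens mask)
        (groups, start, pvMget mask j)
       s.1 ++ [[(s.2.2, PySem.List.slice tokens (some (s.2.1 : Int)) (some (tokens.length : Int)))]])
      = groups ++ pvGo (pvMget mask j)
          ((tokens.drop start).take (j + 1 - start)) ((mask.zip tokens).drop (j + 1)) := by
  intro d
  induction d with
  | zero =>
      intro j groups start hn hs
      have hj : j < tokens.length := by omega
      have hjm : j < mask.length := by omega
      simp only [List.range', List.foldl_nil]
      have hdrop : (mask.zip tokens).drop (j + 1) = [] := by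
        have := pvZipDropEnd mask tokens
        rw [show j + 1 = tokens.length by omega]; exact this
      rw [hdrop]
      simp [pvGo, PySem.List.slice_natCast, show j + 1 = tokens.length by omega]
  | succ d ih =>
      intro j groups start hn hs
      have hj1 : j + 1 < tokens.length := by omega
      have hj1m : j + 1 < mask.length := by omega
      rw [List.range'_succ, List.foldl_cons]
      rw [pvZipDrop mask tokens (j + 1) hj1 hpre]
      by_cases hne : pvMget mask j = pvMget mask (j + 1)
      · -- same mask value: run continues
        have hb : pvBody tokens mask (groups, start, pvMget mask j) (j + 1)
            = (groups, start, pvMget mask (j + 1)) := by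
          simp [pvBody, hne]
        rw [hb, ih (j + 1) groups start (by omega) (by omega)]
        rw [pvGo]
        rw [pvMget_eq mask (j + 1) hj1m] at hne
        rw [← pvTakeSuccDrop tokens start (j + 1) (by omega) hj1]
        rw [pvMget_eq mask (j + 1) hj1m, ← hne]
        rw [if_pos rfl]
      · -- mask value changes: close the group
        have hb : pvBody tokens mask (groups, start, pvMget mask j) (j + 1)
            = (groups ++ [[(pvMget mask j,
                PySem.List.slice tokens (some (start : Int)) (some ((j + 1 : Nat) : Int)))]],
               j + 1, pvMget mask (j + 1)) := by
          simp [pvBody, hne]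
        rw [hb, ih (j + 1) _ (j + 1) (by omega) (by omega)]
        rw [pvGo]
        have hne' : mask[j + 1]'(by omega) ≠ pvMget mask j := by
          rw [← pvMget_eq mask (j + 1) hj1m]
          exact fun h => hne h.symm
        rw [if_neg hne']
        rw [pvMget_eq mask (j + 1) hj1m]
        simp [show j + 1 + 1 - (j + 1) = 1 from by omega,
          pvTakeOneDrop tokens (j + 1) hj1]
        rw [show ((j : Int) + 1) = ((j + 1 : Nat) : Int) from by push_cast; ring,
          PySem.List.slice_natCast]

theorem group_tokens_spec : Claim_equal_group_tokens := by
  intro tokens mask _ hpre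
  replace hpre : tokens.length ≤ mask.length := hpre
  unfold Spec_group_tokens group_tokens group_tokens_alt
  by_cases hne : tokens = []
  · subst hne; simp [pvRuns]
  · have hpos : 0 < tokens.length := List.length_pos_iff.mpr hne
    obtain ⟨m, hm⟩ : ∃ m, tokens.length = m + 1 := ⟨tokens.length - 1, by omega⟩
    simp only [List.isEmpty_eq_false_iff.mpr hne]
    rw [if_neg (by simp)]
    rw [hm, List.range_eq_range', List.range'_succ, List.foldl_cons]
    have hb0 : pvBody tokens mask ([], 0, 0) 0 = ([], 0, pvMget mask 0) := by
      simp [pvBody]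
    rw [hb0, ← hm]
    have hmain := pvLoopA tokens mask hpre m 0 [] 0 (by omega) (le_refl 0)
    simp only at hmain
    rw [hmain]
    have hz : mask.zip tokens = (mask[0]'(by omega), tokens[0]'hpos) ::
        (mask.zip tokens).drop (0 + 1) := by
      simpa using pvZipDrop mask tokens 0 hpos hpre
    conv_rhs => rw [hz]
    rw [pvRuns_cons]
    rw [pvMget_eq mask 0 (by omega)]
    have h1 : List.take (0 + 1 - 0) (List.drop 0 tokens) = [tokens[0]'hpos] := by
      simpa using pvTakeOneDrop tokens 0 hpos
    rw [h1]
    simp
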